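-- pv_equiv track=rewrite | github.com/chensaics/openclaw-py | src/pyclaw/agents/skills/marketplace.py | _extract_skill_name
-- ===== SOURCE A (Python) =====
-- def _extract_skill_name(raw: str) -> str:
--     candidate = raw.strip()
--     if not candidate:
--         return ""
--     for sep in ("@", " "):
--         if sep in candidate:
--             candidate = candidate.split(sep, 1)[0].strip()
--     return candidate.strip("./")
-- ===== SOURCE B (Python) =====
-- def _extract_skill_name(raw: str) -> str:
--     s = raw.strip()
--     head = ""
--     for ch in s:
--         if ch == "@" or ch == " ":
--             break
--         head += ch
--     return head.strip().strip("./")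
-- ===== Notes on version B (the rewrite author's own statement) =====
-- stated objective: simpler
-- what changed: B replaces the two sequential split/strip passes (split at '@', strip, split at ' ', strip) by a single forward scan that stops at the first '@' or ' ', followed by one strip; the empty-input guard disappears.
import Mathlib
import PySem

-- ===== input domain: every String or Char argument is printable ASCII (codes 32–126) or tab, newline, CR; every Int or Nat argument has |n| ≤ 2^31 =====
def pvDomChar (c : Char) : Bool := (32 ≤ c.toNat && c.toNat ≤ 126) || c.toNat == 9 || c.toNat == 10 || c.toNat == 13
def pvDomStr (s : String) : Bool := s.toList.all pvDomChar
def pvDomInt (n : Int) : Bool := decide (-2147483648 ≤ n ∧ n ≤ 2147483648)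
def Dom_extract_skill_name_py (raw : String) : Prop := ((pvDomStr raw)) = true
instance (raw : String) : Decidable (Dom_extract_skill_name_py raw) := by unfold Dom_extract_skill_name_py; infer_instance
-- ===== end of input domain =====

-- B replaces A's two sequential split/strip passes by a single scan to the first '@' or ' '
-- plus one strip (objective: simpler).

-- ===== PORT A =====
-- literal transliteration of A; the for-loop over the literal tuple ("@", " ") is unrolled
-- into its two iterations; split(sep, 1)[0] is (splitOnMax · · 1).headD [] (split never
-- returns an empty list, so [0] always succeeds).
def extract_skill_name_py (raw : String) : String :=
  let candidate := PySem.Chars.strip raw.toList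
  if candidate = [] then ""
  else
    let candidate :=
      if PySem.Chars.isIn ['@'] candidate then
        PySem.Chars.strip ((PySem.Chars.splitOnMax candidate ['@'] 1).headD [])
      else candidate
    let candidate :=
      if PySem.Chars.isIn [' '] candidate then
        PySem.Chars.strip ((PySem.Chars.splitOnMax candidate [' '] 1).headD [])
      else candidate
    String.mk (PySem.Chars.stripChars candidate ['.', '/'])

-- ===== PORT B =====
-- transliteration of Source B: the for/break accumulation of `head` is takeWhile.
def extract_skill_name_py_alt (raw : String) : String :=
  let s := PySem.Chars.strip raw.toList
  let head := s.takeWhile (fun c => !(c == '@' || c == ' '))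
  String.mk (PySem.Chars.stripChars (PySem.Chars.strip head) ['.', '/'])

-- ===== PRECONDITION & SPEC =====
def Spec_extract_skill_name_py (raw : String) (out : String) : Prop := out = extract_skill_name_py_alt raw
instance (raw : String) (out : String) : Decidable (Spec_extract_skill_name_py raw out) := by unfold Spec_extract_skill_name_py; infer_instance

-- ===== CLAIM (what is proved, stated in full; the proofs are below) =====
def Claim_equal_extract_skill_name_py : Prop := ∀ (raw : String), Dom_extract_skill_name_py raw → Spec_extract_skill_name_py raw (extract_skill_name_py raw)

-- ===== LEMMAS AND PROOFS =====

def noLead (t : List Char) : Prop := t.dropWhile PySem.Chars.isspace = t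

theorem noLead_iff (t : List Char) :
    noLead t ↔ ∀ h : t ≠ [], PySem.Chars.isspace (t.head h) = false := by
  cases t with
  | nil => simp [noLead]
  | cons c r =>
    simp only [noLead, List.dropWhile_cons, List.head_cons, ne_eq, reduceCtorEq,
      not_false_iff, forall_const]
    constructor
    · intro h
      by_cases hc : PySem.Chars.isspace c = true
      · rw [if_pos hc] at h
        have hlen := congrArg List.length h
        have hle := List.length_dropWhile_le (p := PySem.Chars.isspace) (l := r)
        simp at hlen
        omega
      · simpa using hc
    · intro h; rw [if_neg (by simp [h])]

theorem noLead_of_prefix {t u : List Char} (h : u <+: t) (ht : noLead t) : noLead u := by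
  rcases h with ⟨r, rfl⟩
  rw [noLead_iff] at *
  intro hne
  have : u ++ r ≠ [] := by simp [hne]
  have := ht this
  rwa [List.head_append_of_ne_nil] at this


theorem rstrip_prefix (t : List Char) : PySem.Chars.rstrip t <+: t := by
  rw [PySem.Chars.rstrip]
  have h : (List.dropWhile PySem.Chars.isspace t.reverse) <:+ t.reverse := List.dropWhile_suffix _
  rcases h with ⟨w, hw⟩
  refine ⟨w.reverse, ?_⟩
  have := congrArg List.reverse hw
  simpa using this

theorem dropWhile_idem (p : Char → Bool) (l : List Char) :
    List.dropWhile p (List.dropWhile p l) = List.dropWhile p l := by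
  induction l with
  | nil => simp
  | cons c r ih =>
    by_cases hc : p c = true
    · simpa [List.dropWhile_cons, hc] using ih
    · simp [List.dropWhile_cons, hc]

theorem strip_of_noLead {t : List Char} (h : noLead t) :
    PySem.Chars.strip t = PySem.Chars.rstrip t := by
  rw [PySem.Chars.strip, PySem.Chars.lstrip, h]

theorem noLead_lstrip (t : List Char) : noLead (PySem.Chars.lstrip t) := by
  rw [PySem.Chars.lstrip, noLead, dropWhile_idem]

theorem strip_noLead (t : List Char) : noLead (PySem.Chars.strip t) :=
  noLead_of_prefix (rstrip_prefix _) (noLead_lstrip t)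

theorem rstrip_idem (t : List Char) :
    PySem.Chars.rstrip (PySem.Chars.rstrip t) = PySem.Chars.rstrip t := by
  simp [PySem.Chars.rstrip, dropWhile_idem]

theorem strip_idem (t : List Char) :
    PySem.Chars.strip (PySem.Chars.strip t) = PySem.Chars.strip t := by
  rw [strip_of_noLead (strip_noLead t), PySem.Chars.strip, rstrip_idem]

theorem rstrip_append_ws {v : List Char} (t : List Char)
    (hv : ∀ x ∈ v, PySem.Chars.isspace x = true) :
    PySem.Chars.rstrip (t ++ v) = PySem.Chars.rstrip t := by
  have hnil : List.dropWhile PySem.Chars.isspace v.reverse = [] := by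
    rw [List.dropWhile_eq_nil_iff]; intro x hx; exact hv x (by simpa using hx)
  rw [PySem.Chars.rstrip, PySem.Chars.rstrip, List.reverse_append,
    List.dropWhile_append, hnil]
  simp

theorem rstrip_decomp (t : List Char) :
    ∃ w, t = PySem.Chars.rstrip t ++ w ∧ ∀ x ∈ w, PySem.Chars.isspace x = true := by
  refine ⟨(List.takeWhile PySem.Chars.isspace t.reverse).reverse, ?_, ?_⟩
  · conv_lhs => rw [← List.reverse_reverse t, ← List.takeWhile_append_dropWhile
      (p := PySem.Chars.isspace) (l := t.reverse)]
    rw [List.reverse_append, PySem.Chars.rstrip]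
  · intro x hx
    exact List.mem_takeWhile_imp (by simpa using hx)

theorem strip_takeWhile_strip {t : List Char} (ht : noLead t) :
    PySem.Chars.strip ((PySem.Chars.strip t).takeWhile (· != ' ')) =
      PySem.Chars.strip (t.takeWhile (· != ' ')) := by
  rcases eq_or_ne t [] with rfl | htne
  · simp [PySem.Chars.strip, PySem.Chars.lstrip, PySem.Chars.rstrip]
  · rw [strip_of_noLead ht]
    obtain ⟨w, hw, hws⟩ := rstrip_decomp t
    set u := PySem.Chars.rstrip t with hu
    have hunl : noLead u := noLead_of_prefix (rstrip_prefix t) ht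
    have hune : u ≠ [] := by
      intro h0
      rw [h0, List.nil_append] at hw
      have : PySem.Chars.isspace (t.head htne) = true := by
        subst hw; exact hws _ (List.head_mem htne)
      rw [(noLead_iff t).mp ht htne] at this; exact absurd this (by simp)
    conv_rhs => rw [hw]
    rw [List.takeWhile_append]
    by_cases hfull : (u.takeWhile (· != ' ')).length = u.length
    · have heq : u.takeWhile (· != ' ') = u :=
        (List.takeWhile_prefix _).eq_of_length hfull
      rw [if_pos hfull]
      have hwp : ∀ x ∈ List.takeWhile (· != ' ') w, PySem.Chars.isspace x = true :=
        fun x hx => hws x (List.Sublist.mem hx (List.takeWhile_sublist _))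
      have hnl2 : noLead (u ++ List.takeWhile (· != ' ') w) := by
        rw [noLead_iff]
        intro hne
        rw [List.head_append_of_ne_nil hune]
        exact (noLead_iff u).mp hunl hune
      rw [heq, strip_of_noLead hnl2, rstrip_append_ws u hwp, strip_of_noLead hunl]
    · rw [if_neg hfull]
theorem go_zero (c : Char) :
    ∀ (fuel : Nat) (l cur : List Char) (acc : List (List Char)),
      PySem.Chars.splitOnMax.go [c] fuel 0 l cur acc = ((cur.reverse ++ l) :: acc).reverse := by
  intro fuel
  cases fuel with
  | zero => intro l cur acc; rw [PySem.Chars.splitOnMax.go]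
  | succ fuel =>
    intro l cur acc
    cases l with
    | nil => rw [PySem.Chars.splitOnMax.go]; simp; omega
    | cons c' rest => rw [PySem.Chars.splitOnMax.go]; simp

theorem splitOnMax_one_headD (c : Char) :
    ∀ (fuel : Nat) (l cur : List Char), l.length < fuel →
      ((PySem.Chars.splitOnMax.go [c] fuel 1 l cur []).headD []) =
        cur.reverse ++ l.takeWhile (· != c) := by
  intro fuel
  induction fuel with
  | zero => intro l cur h; omega
  | succ fuel ih =>
    intro l cur h
    cases l with
    | nil => simp [PySem.Chars.splitOnMax.go]
    | cons c' rest =>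
      rw [PySem.Chars.splitOnMax.go]
      simp only [List.length_cons] at h
      by_cases hc : c' = c
      · have hpre : [c].isPrefixOf (c' :: rest) = true := by simp [List.isPrefixOf, hc]
        simp only [hpre, one_ne_zero, if_false, if_true]
        rw [go_zero c fuel _ _ _]
        simp [hc]
      · have hpre : [c].isPrefixOf (c' :: rest) = false := by
          simp [List.isPrefixOf]; exact fun h' => absurd h'.symm hc
        simp only [hpre, one_ne_zero, if_false, Bool.false_eq_true]
        rw [ih rest (c' :: cur) (by omega)]
        simp [hc]

theorem split_head (t : List Char) (c : Char) :
    (PySem.Chars.splitOnMax t [c] 1).headD [] = t.takeWhile (· != c) := by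
  rw [PySem.Chars.splitOnMax]
  rw [if_neg (by omega)]
  show (PySem.Chars.splitOnMax.go [c] (t.length + 1) (1:Int).toNat t [] []).headD [] = _
  rw [show (1:Int).toNat = 1 from rfl]
  rw [splitOnMax_one_headD c (t.length+1) t [] (by omega)]
  simp

theorem takeWhile_eq_self_of_not_isIn {t : List Char} {c : Char}
    (h : PySem.Chars.isIn [c] t = false) : t.takeWhile (· != c) = t := by
  have hinf : ¬ [c] <:+: t := (PySem.Chars.isIn_eq_false_iff _ _).mp h
  have hmem : c ∉ t := by
    intro hm
    obtain ⟨a, b, rfl⟩ := List.append_of_mem hm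
    exact hinf ⟨a, b, by simp⟩
  rw [List.takeWhile_eq_self_iff]
  intro x hx
  exact bne_iff_ne.mpr fun he => hmem (he ▸ hx)

theorem iter_eq {t : List Char} (c : Char) (ht : PySem.Chars.strip t = t) :
    (if PySem.Chars.isIn [c] t then
        PySem.Chars.strip ((PySem.Chars.splitOnMax t [c] 1).headD [])
      else t) = PySem.Chars.strip (t.takeWhile (· != c)) := by
  cases h : PySem.Chars.isIn [c] t with
  | true => rw [if_pos rfl, split_head]
  | false =>
    rw [if_neg (by simp), takeWhile_eq_self_of_not_isIn h, ht]



theorem pred_eq :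
    (fun c : Char => !(c == '@' || c == ' ')) =
      (fun a : Char => decide ((a != ' ') = true ∧ (a != '@') = true)) := by
  funext c
  by_cases h1 : c = '@' <;> by_cases h2 : c = ' ' <;> simp [h1, h2]


theorem ports_eq (raw : String) : extract_skill_name_py raw = extract_skill_name_py_alt raw := by
  unfold extract_skill_name_py extract_skill_name_py_alt
  set s := PySem.Chars.strip raw.toList with hs
  have hss : PySem.Chars.strip s = s := strip_idem raw.toList
  by_cases h0 : s = []
  · rw [if_pos h0, h0]
    simp [PySem.Chars.strip, PySem.Chars.lstrip, PySem.Chars.rstrip, PySem.Chars.stripChars]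
    rfl
  · rw [if_neg h0]
    simp only [iter_eq '@' hss, iter_eq ' ' (strip_idem _)]
    rw [strip_takeWhile_strip (noLead_of_prefix (List.takeWhile_prefix _) (strip_noLead raw.toList))]
    rw [List.takeWhile_takeWhile, pred_eq]

-- ===== VERDICT (by name: the statement is the Claim_ definition above) =====
theorem extract_skill_name_py_spec : Claim_equal_extract_skill_name_py := by
  intro raw _
  unfold Spec_extract_skill_name_py
  exact ports_eq raw
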